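-- pv_equiv track=rewrite | github.com/avas888/LIA_Graph | scripts/eval/sme_validation_report.py | _build_cross_checks
-- ===== SOURCE A (Python) =====
-- from collections import defaultdict
-- from typing import Any, Iterable
--
-- TOPIC_ORDER = (
--     "beneficio_auditoria",
--     "firmeza_declaraciones",
--     "regimen_sancionatorio_extemporaneidad",
--     "descuentos_tributarios_renta",
--     "tarifas_renta_y_ttd",
--     "dividendos_y_distribucion_utilidades",
--     "devoluciones_saldos_a_favor",
--     "perdidas_fiscales_art147",
--     "precios_de_transferencia",
--     "impuesto_patrimonio_personas_naturales",
--     "regimen_cambiario",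
--     "conciliacion_fiscal",
-- )
--
-- def _build_cross_checks(rows: list[dict[str, Any]]) -> str:
--     by_topic: dict[str, list[dict[str, Any]]] = defaultdict(list)
--     for r in rows:
--         by_topic[r["topic_key_expected"]].append(r)
--
--     impatpn = by_topic.get("impuesto_patrimonio_personas_naturales", [])
--     impatpn_refused = sum(1 for r in impatpn if r["class"] == "refused")
--     impatpn_msg = (
--         f"- `impuesto_patrimonio_personas_naturales`: refused {impatpn_refused}/3 — "
--         f"{'✅ consistent refusal (expected)' if impatpn_refused == 3 else '⚠ unexpected mix — investigate'}"
--     )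
--
--     served_baseline_topics = [
--         t for t in TOPIC_ORDER if t != "impuesto_patrimonio_personas_naturales"
--     ]
--     hidden_refusals: list[str] = []
--     for t in served_baseline_topics:
--         rs = by_topic.get(t, [])
--         if rs and all(r["class"] == "refused" for r in rs):
--             hidden_refusals.append(t)
--     hidden_msg = (
--         f"- 11 baseline-SERVED topics with hidden full-refusals: {len(hidden_refusals)} → "
--         f"{'✅ none' if not hidden_refusals else '⚠ ' + ', '.join(hidden_refusals)}"
--     )
--     return impatpn_msg + "\n" + hidden_msg
-- ===== SOURCE B (Python) =====
-- TOPIC_ORDER = (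
--     "beneficio_auditoria",
--     "firmeza_declaraciones",
--     "regimen_sancionatorio_extemporaneidad",
--     "descuentos_tributarios_renta",
--     "tarifas_renta_y_ttd",
--     "dividendos_y_distribucion_utilidades",
--     "devoluciones_saldos_a_favor",
--     "perdidas_fiscales_art147",
--     "precios_de_transferencia",
--     "impuesto_patrimonio_personas_naturales",
--     "regimen_cambiario",
--     "conciliacion_fiscal",
-- )
--
-- _IMPATPN = "impuesto_patrimonio_personas_naturales"
--
--
-- def _build_cross_checks(rows):
--     # Single pass over rows: keep only aggregates (a refused counter for the
--     # impuesto_patrimonio topic and an all-refused flag per served topic seen),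
--     # instead of materialising per-topic row lists.
--     impatpn_refused = 0
--     all_refused = {}  # served topic -> True while every row seen so far is refused
--     for r in rows:
--         t = r["topic_key_expected"]
--         if t == _IMPATPN:
--             if r["class"] == "refused":
--                 impatpn_refused += 1
--         elif t in TOPIC_ORDER:
--             if t in all_refused:
--                 # lazy 'and': once False, the row's class is irrelevant
--                 all_refused[t] = all_refused[t] and r["class"] == "refused"
--             else:
--                 all_refused[t] = r["class"] == "refused"
--
--     impatpn_msg = (
--         f"- `impuesto_patrimonio_personas_naturales`: refused {impatpn_refused}/3 — "
--         f"{'✅ consistent refusal (expected)' if impatpn_refused == 3 else '⚠ unexpected mix — investigate'}"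
--     )
--     hidden_refusals = [t for t in TOPIC_ORDER if all_refused.get(t, False)]
--     hidden_msg = (
--         f"- 11 baseline-SERVED topics with hidden full-refusals: {len(hidden_refusals)} → "
--         f"{'✅ none' if not hidden_refusals else '⚠ ' + ', '.join(hidden_refusals)}"
--     )
--     return impatpn_msg + "\n" + hidden_msg
-- ===== Notes on version B (the rewrite author's own statement) =====
-- stated objective: alternative
-- what changed: Replaces A's two-phase group-rows-into-a-dict-of-lists then per-topic scans with a single pass over rows that keeps only aggregates (a refused counter for the impuesto_patrimonio topic and a per-served-topic all-refused flag), materialising no per-topic row lists.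
import Mathlib
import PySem

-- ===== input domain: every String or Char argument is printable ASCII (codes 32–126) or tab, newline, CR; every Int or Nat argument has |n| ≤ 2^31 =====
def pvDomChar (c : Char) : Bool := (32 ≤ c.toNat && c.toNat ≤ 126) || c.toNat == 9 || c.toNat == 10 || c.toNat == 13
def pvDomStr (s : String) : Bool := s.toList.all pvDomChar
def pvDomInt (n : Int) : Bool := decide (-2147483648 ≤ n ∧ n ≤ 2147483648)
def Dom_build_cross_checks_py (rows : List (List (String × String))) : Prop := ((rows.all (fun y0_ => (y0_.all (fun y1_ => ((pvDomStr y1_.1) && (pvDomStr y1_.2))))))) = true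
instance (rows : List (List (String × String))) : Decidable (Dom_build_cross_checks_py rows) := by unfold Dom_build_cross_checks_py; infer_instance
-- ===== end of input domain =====

-- B replaces A's group-rows-by-topic dict of lists with a single pass keeping only
-- aggregates (a refused counter and a per-topic all-refused flag); equal cost, no row lists kept.

-- shared module-level context: TOPIC_ORDER, and dict access on a row (first-match lookup)
def TOPIC_ORDER_py : List String :=
  [ "beneficio_auditoria",
    "firmeza_declaraciones",
    "regimen_sancionatorio_extemporaneidad",
    "descuentos_tributarios_renta",
    "tarifas_renta_y_ttd",
    "dividendos_y_distribucion_utilidades",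
    "devoluciones_saldos_a_favor",
    "perdidas_fiscales_art147",
    "precios_de_transferencia",
    "impuesto_patrimonio_personas_naturales",
    "regimen_cambiario",
    "conciliacion_fiscal" ]

def IMPATPN_py : String := "impuesto_patrimonio_personas_naturales"

-- r[k] on a row dict; outside Pre_ (key absent, Python raises KeyError) it defaults to ""
def rget (r : List (String × String)) (k : String) : String :=
  PySem.Dict.getD (PySem.Dict.mk r) k ""

def rhas (r : List (String × String)) (k : String) : Bool :=
  PySem.Dict.contains (PySem.Dict.mk r) k

-- ===== PORT A =====
def build_cross_checks_py (rows : List (List (String × String))) : String :=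
  -- by_topic = defaultdict(list); for r in rows: by_topic[r["topic_key_expected"]].append(r)
  let by_topic : PySem.Dict String (List (List (String × String))) :=
    rows.foldl (fun d r => d.modify (rget r "topic_key_expected") [] (· ++ [r])) PySem.Dict.empty
  let impatpn := by_topic.getD IMPATPN_py []
  let impatpn_refused : Int :=
    impatpn.foldl (fun n r => if rget r "class" == "refused" then n + 1 else n) 0
  let impatpn_msg :=
    "- `impuesto_patrimonio_personas_naturales`: refused " ++ PySem.Int.toStr impatpn_refused
      ++ "/3 — "
      ++ (if impatpn_refused == 3 then "✅ consistent refusal (expected)"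
          else "⚠ unexpected mix — investigate")
  let served_baseline_topics := TOPIC_ORDER_py.filter (fun t => t != IMPATPN_py)
  let hidden_refusals : List String :=
    served_baseline_topics.foldl (fun acc t =>
      let rs := by_topic.getD t []
      if !rs.isEmpty && rs.all (fun r => rget r "class" == "refused") then acc ++ [t] else acc) []
  let hidden_msg :=
    "- 11 baseline-SERVED topics with hidden full-refusals: "
      ++ PySem.Int.toStr (Int.ofNat hidden_refusals.length) ++ " → "
      ++ (if hidden_refusals.isEmpty then "✅ none"
          else "⚠ " ++ PySem.Str.join ", " hidden_refusals)
  impatpn_msg ++ "\n" ++ hidden_msg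

-- ===== PORT B =====
def bccStepB (st : Int × PySem.Dict String Bool) (r : List (String × String)) :
    Int × PySem.Dict String Bool :=
  let t := rget r "topic_key_expected"
  if t == IMPATPN_py then
    (if rget r "class" == "refused" then st.1 + 1 else st.1, st.2)
  else if TOPIC_ORDER_py.contains t then
    match st.2.get? t with
    | some b => (st.1, st.2.insert t (b && rget r "class" == "refused"))
    | none => (st.1, st.2.insert t (rget r "class" == "refused"))
  else st

def build_cross_checks_py_alt (rows : List (List (String × String))) : String :=
  let st := rows.foldl bccStepB (0, PySem.Dict.empty)
  let impatpn_refused : Int := st.1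
  let all_refused : PySem.Dict String Bool := st.2
  let impatpn_msg :=
    "- `impuesto_patrimonio_personas_naturales`: refused " ++ PySem.Int.toStr impatpn_refused
      ++ "/3 — "
      ++ (if impatpn_refused == 3 then "✅ consistent refusal (expected)"
          else "⚠ unexpected mix — investigate")
  let hidden_refusals := TOPIC_ORDER_py.filter (fun t => all_refused.getD t false)
  let hidden_msg :=
    "- 11 baseline-SERVED topics with hidden full-refusals: "
      ++ PySem.Int.toStr (Int.ofNat hidden_refusals.length) ++ " → "
      ++ (if hidden_refusals.isEmpty then "✅ none"
          else "⚠ " ++ PySem.Str.join ", " hidden_refusals)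
  impatpn_msg ++ "\n" ++ hidden_msg

-- ===== PRECONDITION & SPEC =====
-- Python A raises KeyError when a row lacks "topic_key_expected", when an
-- impuesto_patrimonio row lacks "class", or when a served-baseline topic's rows lack
-- "class" before the first non-refused one (all() stops there); Pre_ excludes exactly those.
def bccChainOk : List (List (String × String)) → Bool
  | [] => true
  | r :: rest =>
    rhas r "class" && (if rget r "class" == "refused" then bccChainOk rest else true)

def Pre_build_cross_checks_py (rows : List (List (String × String))) : Prop :=
  (∀ r ∈ rows, rhas r "topic_key_expected" = true) ∧
  (∀ r ∈ rows.filter (fun r => rget r "topic_key_expected" == IMPATPN_py),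
      rhas r "class" = true) ∧
  (∀ t ∈ TOPIC_ORDER_py.filter (fun t => t != IMPATPN_py),
      bccChainOk (rows.filter (fun r => rget r "topic_key_expected" == t)) = true)

instance (rows : List (List (String × String))) : Decidable (Pre_build_cross_checks_py rows) := by
  unfold Pre_build_cross_checks_py; infer_instance

def pvWitness_build_cross_checks_py : (List (List (String × String))) :=
  [ [("topic_key_expected", "precios_de_transferencia"), ("class", "refused")],
    [("topic_key_expected", "beneficio_auditoria"), ("class", "served")],
    [("topic_key_expected", "impuesto_patrimonio_personas_naturales"), ("class", "refused")],
    [("topic_key_expected", "conciliacion_fiscal"), ("class", "ok")] ]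

def Spec_build_cross_checks_py (rows : List (List (String × String))) (out : String) : Prop := out = build_cross_checks_py_alt rows
instance (rows : List (List (String × String))) (out : String) : Decidable (Spec_build_cross_checks_py rows out) := by unfold Spec_build_cross_checks_py; infer_instance

-- ===== CLAIM (what is proved, stated in full; the proofs are below) =====
def Claim_equal_build_cross_checks_py : Prop := ∀ (rows : List (List (String × String))), Dom_build_cross_checks_py rows → Pre_build_cross_checks_py rows → Spec_build_cross_checks_py rows (build_cross_checks_py rows)

-- ===== LEMMAS AND PROOFS =====

theorem bcc_group_getD (rows : List (List (String × String)))
    (d : PySem.Dict String (List (List (String × String)))) (t : String) :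
    (rows.foldl (fun d r => d.modify (rget r "topic_key_expected") [] (· ++ [r])) d).getD t []
      = d.getD t [] ++ rows.filter (fun r => rget r "topic_key_expected" == t) := by
  induction rows generalizing d with
  | nil => simp
  | cons r rest ih =>
    simp only [List.foldl_cons, List.filter_cons, ih]
    by_cases h : rget r "topic_key_expected" = t
    · simp [h]
    · have : (rget r "topic_key_expected" == t) = false := by simp [h]
      simp [this, PySem.Dict.getD_modify, Ne.symm h]

theorem bcc_count (l : List (List (String × String))) (n : Int) :
    l.foldl (fun n r => if rget r "class" == "refused" then n + 1 else n) n
      = n + (l.countP (fun r => rget r "class" == "refused") : Int) := by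
  induction l generalizing n with
  | nil => simp
  | cons r rest ih =>
    simp only [List.foldl_cons, List.countP_cons, ih]
    by_cases h : (rget r "class" == "refused") = true <;> simp [h] <;> ring

theorem bcc_foldB (rows : List (List (String × String))) (c : Int)
    (g : PySem.Dict String Bool) :
    (rows.foldl bccStepB (c, g)).1
        = c + ((rows.filter (fun r => rget r "topic_key_expected" == IMPATPN_py)).countP
                 (fun r => rget r "class" == "refused") : Int)
      ∧ (rows.foldl bccStepB (c, g)).2.get? IMPATPN_py = g.get? IMPATPN_py
      ∧ ∀ t, t ≠ IMPATPN_py →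
          (rows.foldl bccStepB (c, g)).2.get? t
            = (if TOPIC_ORDER_py.contains t
                  && !(rows.filter (fun r => rget r "topic_key_expected" == t)).isEmpty
               then some (g.getD t true
                 && (rows.filter (fun r => rget r "topic_key_expected" == t)).all
                      (fun r => rget r "class" == "refused"))
               else g.get? t) := by
  induction rows generalizing c g with
  | nil => simp
  | cons r rest ih =>
    simp only [List.foldl_cons]
    set u := rget r "topic_key_expected" with hu
    by_cases h1 : u = IMPATPN_py
    · have hb : (u == IMPATPN_py) = true := by simp [h1]
      have hstep : bccStepB (c, g) r
          = (if rget r "class" == "refused" then c + 1 else c, g) := by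
        simp [bccStepB, ← hu, hb]
      rw [hstep]
      obtain ⟨ih1, ih2, ih3⟩ := ih (if rget r "class" == "refused" then c + 1 else c) g
      refine ⟨?_, ih2, ?_⟩
      · rw [ih1]
        simp only [List.filter_cons, ← hu, hb, List.countP_cons]
        by_cases hc : (rget r "class" == "refused") = true <;> simp [hc] <;> ring
      · intro t ht
        rw [ih3 t ht]
        have : (u == t) = false := by simp [h1]; exact fun he => ht he.symm
        simp [List.filter_cons, ← hu, this]
    · have hb : (u == IMPATPN_py) = false := by simp [h1]
      by_cases h2 : TOPIC_ORDER_py.contains u = true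
      · have hmem : u ∈ TOPIC_ORDER_py := by simpa using h2
        have hstep : bccStepB (c, g) r
            = (c, g.insert u (g.getD u true && (rget r "class" == "refused"))) := by
          simp only [bccStepB, ← hu, hb, Bool.false_eq_true, if_false, h2, if_true]
          cases hg : g.get? u with
          | some b => simp [PySem.Dict.getD, hg]
          | none => simp [PySem.Dict.getD, hg]
        rw [hstep]
        obtain ⟨ih1, ih2, ih3⟩ :=
          ih c (g.insert u (g.getD u true && (rget r "class" == "refused")))
        refine ⟨?_, ?_, ?_⟩
        · rw [ih1]; simp [List.filter_cons, ← hu, hb]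
        · rw [ih2, PySem.Dict.get?_insert]; simp [Ne.symm h1]
        · intro t ht
          rw [ih3 t ht]
          by_cases he : t = u
          · subst he
            by_cases hrest :
                (rest.filter (fun r => rget r "topic_key_expected" == u)) = []
            · simp [List.filter_cons, ← hu, h2, hmem, hrest, PySem.Dict.get?_insert,
                PySem.Dict.getD_insert, Bool.and_assoc]
            · simp [List.filter_cons, ← hu, h2, hmem, hrest, PySem.Dict.get?_insert,
                PySem.Dict.getD_insert, Bool.and_assoc, List.isEmpty_iff]
          · have hne : (u == t) = false := by simp; exact fun hh => he (hh.symm)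
            rw [PySem.Dict.get?_insert]
            simp [List.filter_cons, ← hu, hne, he, PySem.Dict.getD_insert]
      · have hmem : u ∉ TOPIC_ORDER_py := by simpa using h2
        have hstep : bccStepB (c, g) r = (c, g) := by
          simp [bccStepB, ← hu, hb, h2, hmem]
        rw [hstep]
        obtain ⟨ih1, ih2, ih3⟩ := ih c g
        refine ⟨?_, ih2, ?_⟩
        · rw [ih1]; simp [List.filter_cons, ← hu, hb]
        · intro t ht
          rw [ih3 t ht]
          by_cases he : t = u
          · subst he; simp [h2, hmem]
          · have hne : (u == t) = false := by simp; exact fun hh => he (hh.symm)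
            simp [List.filter_cons, ← hu, hne]

-- ===== VERDICT (by name: the statement is the Claim_ definition above) =====
theorem build_cross_checks_py_spec : Claim_equal_build_cross_checks_py := by
  intro rows _ _
  unfold Spec_build_cross_checks_py build_cross_checks_py build_cross_checks_py_alt
  obtain ⟨hB1, hB2, hB3⟩ := bcc_foldB rows 0 PySem.Dict.empty
  have hcnt :
      List.foldl (fun n r => if rget r "class" == "refused" then n + 1 else n) (0 : Int)
        ((rows.foldl (fun d r => d.modify (rget r "topic_key_expected") [] (· ++ [r]))
          PySem.Dict.empty).getD IMPATPN_py [])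
      = (rows.foldl bccStepB (0, PySem.Dict.empty)).1 := by
    rw [bcc_group_getD, bcc_count, hB1]
    simp [PySem.Dict.getD_empty]
  have hhid :
      (TOPIC_ORDER_py.filter (fun t => t != IMPATPN_py)).foldl (fun acc t =>
          let rs := (rows.foldl (fun d r => d.modify (rget r "topic_key_expected") [] (· ++ [r]))
              PySem.Dict.empty).getD t []
          if !rs.isEmpty && rs.all (fun r => rget r "class" == "refused") then acc ++ [t]
          else acc) []
      = TOPIC_ORDER_py.filter
          (fun t => (rows.foldl bccStepB (0, PySem.Dict.empty)).2.getD t false) := by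
    rw [PySem.List.foldl_append_if_eq_filter, List.filter_filter]
    apply List.filter_congr
    intro t htmem
    by_cases h1 : t = IMPATPN_py
    · simp [h1, PySem.Dict.getD, hB2, PySem.Dict.get?_empty]
    · have hcont : TOPIC_ORDER_py.contains t = true := List.elem_eq_true_of_mem htmem
      have hg := bcc_group_getD rows PySem.Dict.empty t
      have h3 := hB3 t h1
      simp only [PySem.Dict.getD, PySem.Dict.get?_empty, PySem.Dict.getD_empty,
        Option.getD_none, List.nil_append, hcont, Bool.true_and] at hg h3 ⊢
      rw [hg, h3]
      by_cases hrs :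
          (rows.filter (fun r => rget r "topic_key_expected" == t)).isEmpty = true
      · simp [hrs, h1]
      · simp [hrs, h1]
  simp only [hcnt, hhid]
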